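-- pv_equiv track=rewrite | github.com/jozo/hacker-resume | app.py | repos_for_langs
-- ===== SOURCE A (Python) =====
-- def repos_for_langs(data, langs):
--     repo_langs_sum = {}
--     for l in langs:
--         repo_langs_sum[l] = []
--     for d in data['repo_sumary']:
--         repo_langs = set(map(lambda a: a.lower().replace(' ','-') ,data['repo_sumary'][d]['languages'].keys()))
--         intersect = repo_langs.intersection(langs)
--         if intersect:
--             for lang in intersect:
--                 repo_langs_sum[lang].append(d)
--
--     return repo_langs_sum
-- ===== SOURCE B (Python) =====
-- def repos_for_langs(data, langs):
--     # One dict comprehension: for each requested language, scan the repos and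
--     # collect (in repo order) those whose normalized language names contain it.
--     return {
--         l: [d for d in data['repo_sumary']
--             if l in {x.lower().replace(' ', '-')
--                      for x in data['repo_sumary'][d]['languages'].keys()}]
--         for l in langs
--     }
-- ===== Notes on version B (the rewrite author's own statement) =====
-- stated objective: idiomatic
-- what changed: Replaces the two imperative passes (pre-seed empty buckets per language, then per-repo compute set intersection and append into buckets) with a single dict comprehension that loops over the requested languages and, per language, filters the repos whose normalized language set contains it.
import Mathlib
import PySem

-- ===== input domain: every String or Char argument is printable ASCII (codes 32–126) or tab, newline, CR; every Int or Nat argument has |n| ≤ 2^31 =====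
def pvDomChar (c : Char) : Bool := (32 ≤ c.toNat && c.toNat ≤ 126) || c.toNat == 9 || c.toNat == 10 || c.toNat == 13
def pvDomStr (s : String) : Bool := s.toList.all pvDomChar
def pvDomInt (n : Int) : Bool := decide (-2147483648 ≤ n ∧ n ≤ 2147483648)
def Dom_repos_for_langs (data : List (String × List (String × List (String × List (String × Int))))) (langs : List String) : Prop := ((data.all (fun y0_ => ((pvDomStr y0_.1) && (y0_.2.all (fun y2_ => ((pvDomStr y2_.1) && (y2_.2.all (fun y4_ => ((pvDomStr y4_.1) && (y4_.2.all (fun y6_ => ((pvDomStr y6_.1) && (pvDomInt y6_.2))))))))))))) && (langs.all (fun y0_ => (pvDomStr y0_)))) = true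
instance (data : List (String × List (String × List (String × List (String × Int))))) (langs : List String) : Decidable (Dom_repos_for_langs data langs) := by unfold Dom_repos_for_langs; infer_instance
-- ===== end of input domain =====

-- B rewrites the repo-indexing pass as a single dict comprehension looping over the
-- requested languages (per-language scans of the repos); idiomatic, not faster.

-- ===== PORT A =====
-- A iterates a dict's keys and indexes it; the port iterates the (key, value) items of the
-- deduplicated dict, which is exact because its keys are unique.  The per-repo loop over the
-- set 'intersect' appends each repo id to buckets at DISTINCT dict keys, so the resulting
-- dict does not depend on the set's iteration order; 'repo_langs_sum[lang].append(d)' is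
-- modify with default [] — exact because lang ∈ intersect ⊆ langs ⊆ keys(repo_langs_sum).
def repos_for_langs (data : List (String × List (String × List (String × List (String × Int))))) (langs : List String) : List (String × List String) :=
  let init : PySem.Dict String (List String) :=
    langs.foldl (fun d l => d.insert l []) PySem.Dict.empty
  let repos := (PySem.Dict.ofList ((PySem.Dict.ofList data).getD "repo_sumary" [])).items
  let final := repos.foldl (fun st p =>
    let repo_langs : PySem.Set String :=
      PySem.Set.ofList
        (((PySem.Dict.ofList ((PySem.Dict.ofList p.2).getD "languages" [])).keys).map
          (fun a => PySem.Str.replace (PySem.Str.lower a) " " "-"))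
    let intersect := PySem.Set.inter repo_langs langs
    if intersect ≠ [] then
      intersect.foldl (fun st2 lang => st2.modify lang [] (fun xs => xs ++ [p.1])) st
    else st) init
  final.items

-- ===== PORT B =====
def repos_for_langs_alt (data : List (String × List (String × List (String × List (String × Int))))) (langs : List String) : List (String × List String) :=
  let repos := (PySem.Dict.ofList ((PySem.Dict.ofList data).getD "repo_sumary" [])).items
  (langs.foldl (fun d l =>
      d.insert l (repos.filterMap (fun p =>
        if PySem.Set.contains
            (PySem.Set.ofList
              (((PySem.Dict.ofList ((PySem.Dict.ofList p.2).getD "languages" [])).keys).map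
                (fun x => PySem.Str.replace (PySem.Str.lower x) " " "-"))) l
        then some p.1 else none)))
    PySem.Dict.empty).items

-- ===== PRECONDITION & SPEC =====
-- Pre_ excludes exactly the inputs on which A raises KeyError: no 'repo_sumary' key, or
-- some repo without a 'languages' key.
def Pre_repos_for_langs (data : List (String × List (String × List (String × List (String × Int))))) (langs : List String) : Prop :=
  (PySem.Dict.ofList data).contains "repo_sumary" = true ∧
  ∀ p ∈ (PySem.Dict.ofList ((PySem.Dict.ofList data).getD "repo_sumary" [])).items,
    (PySem.Dict.ofList p.2).contains "languages" = true
instance (data : List (String × List (String × List (String × List (String × Int))))) (langs : List String) : Decidable (Pre_repos_for_langs data langs) := by unfold Pre_repos_for_langs; infer_instance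

def pvWitness_repos_for_langs : (List (String × List (String × List (String × List (String × Int))))) × List String :=
  ([("repo_sumary", [("r1", [("languages", [("Python", 10)])])])], ["python"])

def Spec_repos_for_langs (data : List (String × List (String × List (String × List (String × Int))))) (langs : List String) (out : List (String × List String)) : Prop := out = repos_for_langs_alt data langs
instance (data : List (String × List (String × List (String × List (String × Int))))) (langs : List String) (out : List (String × List String)) : Decidable (Spec_repos_for_langs data langs out) := by unfold Spec_repos_for_langs; infer_instance

-- ===== CLAIM (what is proved, stated in full; the proofs are below) =====
def Claim_equal_repos_for_langs : Prop := ∀ (data : List (String × List (String × List (String × List (String × Int))))) (langs : List String), Dom_repos_for_langs data langs → Pre_repos_for_langs data langs → Spec_repos_for_langs data langs (repos_for_langs data langs)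

-- ===== LEMMAS AND PROOFS =====

-- Set.update adds nothing when every element is already present
theorem pv_update_of_subset (s : List String) (xs : List String) (h : ∀ x ∈ xs, x ∈ s) :
    PySem.Set.update s xs = s := by
  induction xs with
  | nil => rfl
  | cons a xs ih =>
    have ha : PySem.Set.add s a = s := by
      simp [PySem.Set.add, PySem.Set.contains, h a (by simp)]
    show List.foldl PySem.Set.add s (a :: xs) = s
    rw [List.foldl_cons, ha]
    exact ih (fun x hx => h x (by simp [hx]))

-- value of the inner append loop (over a duplicate-free list of keys)
theorem pv_inner_getD (v : String) (I : List String) (hI : I.Nodup)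
    (st : PySem.Dict String (List String)) (k : String) :
    (I.foldl (fun st2 lang => st2.modify lang [] (fun xs => xs ++ [v])) st).getD k []
      = st.getD k [] ++ (if k ∈ I then [v] else []) := by
  induction I generalizing st with
  | nil => simp
  | cons a I ih =>
    rw [List.foldl_cons, ih (List.nodup_cons.mp hI).2, PySem.Dict.getD_modify]
    by_cases hk : k = a
    · subst hk
      have : k ∉ I := (List.nodup_cons.mp hI).1
      simp [this]
    · simp [hk]

-- the inner append loop does not change the key list when all keys are present
theorem pv_inner_keys (v : String) (I : List String)
    (st : PySem.Dict String (List String)) (h : ∀ x ∈ I, x ∈ st.keys) :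
    (I.foldl (fun st2 lang => st2.modify lang [] (fun xs => xs ++ [v])) st).keys = st.keys := by
  rw [PySem.Dict.keys_foldl_modify I [] (fun _ _ xs => xs ++ [v]) st]
  exact pv_update_of_subset _ _ h

-- the repo loop of A does not change the key list
theorem pv_A_fold_keys (langs : List String)
    (N : (String × List (String × List (String × Int))) → PySem.Set String)
    (repos : List (String × List (String × List (String × Int))))
    (st : PySem.Dict String (List String)) (hkeys : ∀ x ∈ langs, x ∈ st.keys) :
    (repos.foldl (fun st p =>
        if PySem.Set.inter (N p) langs ≠ [] then
          (PySem.Set.inter (N p) langs).foldl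
            (fun st2 lang => st2.modify lang [] (fun xs => xs ++ [p.1])) st
        else st) st).keys = st.keys := by
  induction repos generalizing st with
  | nil => rfl
  | cons p repos ih =>
    rw [List.foldl_cons]
    by_cases hI : PySem.Set.inter (N p) langs ≠ []
    · rw [if_pos hI]
      have hsub : ∀ x ∈ PySem.Set.inter (N p) langs, x ∈ st.keys := fun x hx =>
        hkeys x ((PySem.Set.mem_inter (N p) langs x).mp hx).2
      rw [ih _ (fun x hx => by rw [pv_inner_keys _ _ _ hsub]; exact hkeys x hx),
        pv_inner_keys _ _ _ hsub]
    · rw [if_neg hI]; exact ih st hkeys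

-- value of A's repo loop: each requested language collects the matching repo ids in repo order
theorem pv_A_fold_getD (langs : List String)
    (N : (String × List (String × List (String × Int))) → PySem.Set String)
    (hN : ∀ p, (N p).Nodup)
    (repos : List (String × List (String × List (String × Int))))
    (st : PySem.Dict String (List String)) (hkeys : ∀ x ∈ langs, x ∈ st.keys)
    (k : String) (hk : k ∈ langs) :
    (repos.foldl (fun st p =>
        if PySem.Set.inter (N p) langs ≠ [] then
          (PySem.Set.inter (N p) langs).foldl
            (fun st2 lang => st2.modify lang [] (fun xs => xs ++ [p.1])) st
        else st) st).getD k []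
      = st.getD k [] ++ repos.filterMap
          (fun p => if PySem.Set.contains (N p) k then some p.1 else none) := by
  induction repos generalizing st with
  | nil => simp
  | cons p repos ih =>
    have hceq : PySem.Set.contains (N p) k = true ↔ k ∈ N p := by
      simp [PySem.Set.contains]
    have hmem : k ∈ PySem.Set.inter (N p) langs ↔ k ∈ N p := by
      rw [PySem.Set.mem_inter]; simp [hk]
    rw [List.foldl_cons, List.filterMap_cons]
    by_cases hI : PySem.Set.inter (N p) langs ≠ []
    · have hsub : ∀ x ∈ PySem.Set.inter (N p) langs, x ∈ st.keys := fun x hx =>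
        hkeys x ((PySem.Set.mem_inter (N p) langs x).mp hx).2
      have hInd : (PySem.Set.inter (N p) langs).Nodup := (hN p).filter _
      rw [if_pos hI, ih _ (fun x hx => by rw [pv_inner_keys _ _ _ hsub]; exact hkeys x hx),
        pv_inner_getD _ _ hInd st k]
      by_cases hkN : k ∈ N p
      · rw [if_pos (hmem.mpr hkN), if_pos (hceq.mpr hkN)]; simp
      · rw [if_neg (fun h => hkN (hmem.mp h)), if_neg (fun h => hkN (hceq.mp h))]; simp
    · have hInil : PySem.Set.inter (N p) langs = [] := not_not.mp hI
      have hkN : k ∉ N p := fun h => by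
        have := hmem.mpr h
        rw [hInil] at this
        exact List.not_mem_nil this
      rw [if_neg hI, ih st hkeys, if_neg (fun h => hkN (hceq.mp h))]

-- value of B's insert loop (the inserted value depends only on the key)
theorem pv_B_fold_getD (g : String → List String) (langs : List String)
    (d : PySem.Dict String (List String)) (k : String) :
    (langs.foldl (fun d l => d.insert l (g l)) d).getD k []
      = if k ∈ langs then g k else d.getD k [] := by
  induction langs generalizing d with
  | nil => simp
  | cons a langs ih =>
    rw [List.foldl_cons, ih]
    by_cases h : k ∈ langs
    · simp [h]
    · rw [if_neg h, PySem.Dict.getD_insert]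
      by_cases hk : k = a <;> simp [hk, h]

-- key list of an insert loop started from the empty dict
theorem pv_keys_insert_fold (g : String → List String) (langs : List String) :
    (langs.foldl (fun d l => d.insert l (g l)) PySem.Dict.empty).keys
      = PySem.Set.ofList langs := by
  rw [PySem.Dict.keys_foldl_insert langs (fun _ l => g l) PySem.Dict.empty,
    PySem.Dict.keys_empty, PySem.Set.update_nil_left]

-- ===== VERDICT (by name: the statement is the Claim_ definition above) =====
theorem repos_for_langs_spec : Claim_equal_repos_for_langs := by
  intro data langs _ _
  unfold Spec_repos_for_langs repos_for_langs repos_for_langs_alt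
  dsimp only
  set repos := (PySem.Dict.ofList ((PySem.Dict.ofList data).getD "repo_sumary" [])).items
    with hrepos
  set N := fun (p : String × List (String × List (String × Int))) =>
    PySem.Set.ofList
      (((PySem.Dict.ofList ((PySem.Dict.ofList p.2).getD "languages" [])).keys).map
        (fun a => PySem.Str.replace (PySem.Str.lower a) " " "-")) with hNdef
  set init : PySem.Dict String (List String) :=
    langs.foldl (fun d l => d.insert l []) PySem.Dict.empty with hinit
  have hN : ∀ p, (N p).Nodup := fun p => PySem.Set.nodup_ofList _
  have hkeysInit : init.keys = PySem.Set.ofList langs := pv_keys_insert_fold (fun _ => []) langs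
  have hkeysmem : ∀ x ∈ langs, x ∈ init.keys := by
    rw [hkeysInit]; intro x hx; exact (PySem.Set.mem_ofList langs x).mpr hx
  have hkA : (repos.foldl (fun st p =>
      if PySem.Set.inter (N p) langs ≠ [] then
        (PySem.Set.inter (N p) langs).foldl
          (fun st2 lang => st2.modify lang [] (fun xs => xs ++ [p.1])) st
      else st) init).keys = PySem.Set.ofList langs :=
    (pv_A_fold_keys langs N repos init hkeysmem).trans hkeysInit
  have hkB : (langs.foldl (fun d l =>
      d.insert l (repos.filterMap (fun p =>
        if PySem.Set.contains (N p) l then some p.1 else none))) PySem.Dict.empty).keys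
      = PySem.Set.ofList langs :=
    pv_keys_insert_fold _ langs
  rw [PySem.Dict.items_eq_map_keys _ (by rw [hkA]; exact PySem.Set.nodup_ofList langs) [],
    PySem.Dict.items_eq_map_keys _ (by rw [hkB]; exact PySem.Set.nodup_ofList langs) [],
    hkA, hkB]
  refine List.map_congr_left (fun k hkm => ?_)
  have hkl : k ∈ langs := (PySem.Set.mem_ofList langs k).mp hkm
  have hA := pv_A_fold_getD langs N hN repos init hkeysmem k hkl
  have hinitD : init.getD k [] = [] := by
    rw [hinit, pv_B_fold_getD (fun _ => []) langs PySem.Dict.empty k]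
    by_cases h : k ∈ langs <;> simp [h]
  have hB := pv_B_fold_getD
    (fun l => repos.filterMap (fun p => if PySem.Set.contains (N p) l then some p.1 else none))
    langs PySem.Dict.empty k
  rw [hA, hinitD, hB, if_pos hkl]
  simp
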